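-- pv_equiv track=rewrite | github.com/glasgowshipyard/obfuscii | obfuscii/vid.py | get_spatial_context
-- ===== SOURCE A (Python) =====
-- from typing import List, Tuple, Optional
--
-- def get_spatial_context(frame: List[List[str]], row: int, col: int, radius: int = 2) -> List[str]:
--     """Get characters in larger spatial context around position"""
--
--     context = []
--     height = len(frame)
--     width = len(frame[0]) if frame else 0
--
--     for dr in range(-radius, radius + 1):
--         for dc in range(-radius, radius + 1):
--             if dr == 0 and dc == 0:  # Skip center
--                 continue
--
--             r, c = row + dr, col + dc
--             if 0 <= r < height and 0 <= c < width:
--                 context.append(frame[r][c])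
--
--     return context
-- ===== SOURCE B (Python) =====
-- def get_spatial_context(frame, row, col, radius=2):
--     """Get characters in larger spatial context around position"""
--     height = len(frame)
--     width = len(frame[0]) if frame else 0
--     lo = max(0, col - radius)
--     hi = max(0, min(width, col + radius + 1))
--     context = []
--     for r in range(max(0, row - radius), min(height, row + radius + 1)):
--         if r != row:
--             context += frame[r][lo:hi]
--         else:
--             context += frame[r][lo:min(hi, max(0, col))]
--             context += frame[r][max(lo, col + 1):hi]
--     return context
-- ===== Notes on version B (the rewrite author's own statement) =====
-- stated objective: faster
-- what changed: A scans the full (2r+1)x(2r+1) offset window cell by cell with a per-cell bounds test and append; B iterates once over the row range clipped to the grid and appends whole-row clamped slices (splitting the centre row around the centre cell), so work is bounded by the window's intersection with the grid instead of the window size.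
import Mathlib
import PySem

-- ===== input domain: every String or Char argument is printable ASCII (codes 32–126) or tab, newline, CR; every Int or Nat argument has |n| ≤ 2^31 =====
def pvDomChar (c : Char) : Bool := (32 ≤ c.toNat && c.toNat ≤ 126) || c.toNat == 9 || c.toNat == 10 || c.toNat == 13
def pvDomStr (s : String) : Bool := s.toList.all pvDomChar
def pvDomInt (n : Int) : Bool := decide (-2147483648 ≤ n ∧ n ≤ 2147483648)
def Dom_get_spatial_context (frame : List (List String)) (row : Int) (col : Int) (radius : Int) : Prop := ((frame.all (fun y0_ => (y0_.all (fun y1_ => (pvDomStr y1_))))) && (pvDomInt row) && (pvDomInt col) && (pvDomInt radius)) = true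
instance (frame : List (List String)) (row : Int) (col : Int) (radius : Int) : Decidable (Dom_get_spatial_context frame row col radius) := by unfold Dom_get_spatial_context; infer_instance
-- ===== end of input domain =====

-- B replaces A's per-cell nested dr/dc loops (a bounds test and append for every offset pair)
-- with one pass over the row range clipped to the grid, appending clamped whole-row slices
-- (objective: faster — B's work is bounded by the window's intersection with the grid).

-- ===== PORT A =====
def get_spatial_context (frame : List (List String)) (row : Int) (col : Int) (radius : Int) : List String :=
  let height : Int := frame.length
  let width : Int := (frame.headD []).length
  (PySem.List.pyRange (-radius) (radius + 1) 1).foldl (fun context dr =>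
    (PySem.List.pyRange (-radius) (radius + 1) 1).foldl (fun context dc =>
      if dr = 0 ∧ dc = 0 then context
      else
        let r := row + dr
        let c := col + dc
        if 0 ≤ r ∧ r < height ∧ 0 ≤ c ∧ c < width then
          context ++ [PySem.List.pyGetD (PySem.List.pyGetD frame r []) c ""]
        else context) context) []

-- ===== PORT B =====
def get_spatial_context_alt (frame : List (List String)) (row : Int) (col : Int) (radius : Int) : List String :=
  let height : Int := frame.length
  let width : Int := (frame.headD []).length
  let lo : Int := max 0 (col - radius)
  let hi : Int := max 0 (min width (col + radius + 1))
  (PySem.List.pyRange (max 0 (row - radius)) (min height (row + radius + 1)) 1).foldl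
    (fun context r =>
      let rowL := PySem.List.pyGetD frame r []
      if r ≠ row then
        context ++ PySem.List.slice rowL (some lo) (some hi)
      else
        (context ++ PySem.List.slice rowL (some lo) (some (min hi (max 0 col))))
          ++ PySem.List.slice rowL (some (max lo (col + 1))) (some hi)) []

-- ===== PRECONDITION & SPEC =====
-- Pre_ excludes exactly the inputs on which A raises IndexError: a ragged frame with a row
-- inside the vertical window that is shorter than the clipped column window indexed in it.
def Pre_get_spatial_context (frame : List (List String)) (row : Int) (col : Int) (radius : Int) : Prop :=
  ∀ i : Nat, i < frame.length → row - radius ≤ (i : Int) → (i : Int) ≤ row + radius →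
    (min ((frame.headD []).length : Int) (col + radius + 1) ≤ ((frame.getD i []).length : Int)
     ∨ min ((frame.headD []).length : Int) (col + radius + 1) ≤ max 0 (col - radius)
     ∨ ((i : Int) = row ∧ col + 1 = min ((frame.headD []).length : Int) (col + radius + 1)
        ∧ (min ((frame.headD []).length : Int) (col + radius + 1) - 1 ≤ ((frame.getD i []).length : Int)
           ∨ min ((frame.headD []).length : Int) (col + radius + 1) - 1 ≤ max 0 (col - radius))))

instance (frame : List (List String)) (row : Int) (col : Int) (radius : Int) : Decidable (Pre_get_spatial_context frame row col radius) := by unfold Pre_get_spatial_context; infer_instance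

def pvWitness_get_spatial_context : List (List String) × Int × Int × Int :=
  ([["a", "b"], ["c", "d"]], 0, 0, 1)

def Spec_get_spatial_context (frame : List (List String)) (row : Int) (col : Int) (radius : Int) (out : List String) : Prop := out = get_spatial_context_alt frame row col radius
instance (frame : List (List String)) (row : Int) (col : Int) (radius : Int) (out : List String) : Decidable (Spec_get_spatial_context frame row col radius out) := by unfold Spec_get_spatial_context; infer_instance

-- ===== CLAIM (what is proved, stated in full; the proofs are below) =====
def Claim_equal_get_spatial_context : Prop := ∀ (frame : List (List String)) (row : Int) (col : Int) (radius : Int), Dom_get_spatial_context frame row col radius → Pre_get_spatial_context frame row col radius → Spec_get_spatial_context frame row col radius (get_spatial_context frame row col radius)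


-- ===== LEMMAS AND PROOFS =====

-- A's per-row contribution, after reindexing dr ↦ r = row + dr and dc ↦ c = col + dc.
def pvRowA (frame : List (List String)) (row col radius r : Int) : List String :=
  ((PySem.List.pyRange (col - radius) (col + radius + 1) 1).filter
    (fun c => decide (¬(r = row ∧ c = col) ∧
      (0 ≤ r ∧ r < (frame.length : Int) ∧ 0 ≤ c ∧ c < ((frame.headD []).length : Int))))).map
    (fun c => PySem.List.pyGetD (PySem.List.pyGetD frame r []) c "")

-- B's per-row contribution (the body of B's loop).
def pvRowB (frame : List (List String)) (row col radius r : Int) : List String :=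
  let width : Int := (frame.headD []).length
  let lo : Int := max 0 (col - radius)
  let hi : Int := max 0 (min width (col + radius + 1))
  let rowL := PySem.List.pyGetD frame r []
  if r ≠ row then PySem.List.slice rowL (some lo) (some hi)
  else PySem.List.slice rowL (some lo) (some (min hi (max 0 col)))
         ++ PySem.List.slice rowL (some (max lo (col + 1))) (some hi)

lemma pvFlatMap_congr {α β : Type} (l : List α) (f g : α → List β)
    (h : ∀ x ∈ l, f x = g x) : l.flatMap f = l.flatMap g := by
  induction l with
  | nil => rfl
  | cons x xs ih =>
    simp only [List.flatMap_cons]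
    rw [h x (by simp), ih (fun y hy => h y (by simp [hy]))]

lemma pvRange_shift_flatMap {β : Type} (t a b : Int) (g : Int → List β) :
    (PySem.List.pyRange a b 1).flatMap (fun x => g (t + x))
      = (PySem.List.pyRange (t + a) (t + b) 1).flatMap g := by
  rw [PySem.List.pyRange_one a b, PySem.List.pyRange_one (t + a) (t + b)]
  have e : t + b - (t + a) = b - a := by ring
  rw [e, List.flatMap_map, List.flatMap_map]
  apply pvFlatMap_congr
  intro k _
  congr 1
  ring

lemma pvRange_shift_filter_map {β : Type} (t a b : Int) (p : Int → Bool) (f : Int → β) :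
    ((PySem.List.pyRange a b 1).filter (fun x => p (t + x))).map (fun x => f (t + x))
      = ((PySem.List.pyRange (t + a) (t + b) 1).filter p).map f := by
  rw [PySem.List.pyRange_one a b, PySem.List.pyRange_one (t + a) (t + b)]
  have e : t + b - (t + a) = b - a := by ring
  rw [e, List.filter_map, List.filter_map, List.map_map, List.map_map]
  have hp : ((fun x => p (t + x)) ∘ fun k : Nat => a + (k : Int))
      = (p ∘ fun k : Nat => t + a + (k : Int)) := by
    funext k
    simp only [Function.comp]
    congr 1
    ring
  have hf : ((fun x => f (t + x)) ∘ fun k : Nat => a + (k : Int))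
      = (f ∘ fun k : Nat => t + a + (k : Int)) := by
    funext k
    simp only [Function.comp]
    congr 1
    ring
  rw [hp, hf]

-- Core single-row fact: collecting xs[c] over c ∈ [a, b) under the bounds test 0 ≤ c < W
-- is the clamped slice xs[max 0 a : max 0 (min W b)].
lemma pvSliceEq_len {α : Type} (xs : List α) (d : α) (W b : Int) (hW : 0 ≤ W)
    (hlen : min W b ≤ (xs.length : Int)) :
    ∀ (n : Nat) (a : Int), (b - a).toNat = n →
    ((PySem.List.pyRange a b 1).filter (fun c => decide (0 ≤ c ∧ c < W))).map
        (fun c => PySem.List.pyGetD xs c d)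
      = PySem.List.slice xs (some (max 0 a)) (some (max 0 (min W b))) := by
  intro n
  induction n with
  | zero =>
    intro a ha
    rw [PySem.List.pyRange_one_eq_nil (by omega)]
    rw [PySem.List.slice_toNat xs (by omega) (by omega)]
    have h0 : (max 0 (min W b)).toNat - (max 0 a).toNat = 0 := by omega
    simp [h0]
  | succ n ih =>
    intro a ha
    have hab : a < b := by omega
    rw [PySem.List.pyRange_one_cons hab, List.filter_cons]
    by_cases hc : 0 ≤ a ∧ a < W
    · rw [if_pos (by simpa using hc)]
      simp only [List.map_cons]
      rw [ih (a + 1) (by omega)]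
      have hxl : a < (xs.length : Int) := by omega
      rw [PySem.List.pyGetD_eq_getElem xs d hc.1 hxl]
      rw [PySem.List.slice_toNat xs (by omega) (by omega),
          PySem.List.slice_toNat xs (by omega) (by omega)]
      have h1 : (max 0 (a + 1)).toNat = a.toNat + 1 := by omega
      have h0a : (max 0 a).toNat = a.toNat := by omega
      rw [h1, h0a]
      rw [List.drop_eq_getElem_cons (show a.toNat < xs.length by omega)]
      have h2 : (max 0 (min W b)).toNat - a.toNat
          = ((max 0 (min W b)).toNat - (a.toNat + 1)) + 1 := by omega
      rw [h2, List.take_succ_cons]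
    · rw [if_neg (by simpa using hc)]
      by_cases ha0 : a < 0
      · rw [ih (a + 1) (by omega)]
        have : max 0 (a + 1) = max 0 a := by omega
        rw [this]
      · have hfil : (PySem.List.pyRange (a + 1) b 1).filter (fun c => decide (0 ≤ c ∧ c < W)) = [] := by
          rw [List.filter_eq_nil_iff]
          intro c hcmem
          have hm := PySem.List.mem_pyRange_one.mp hcmem
          simp only [decide_eq_true_eq]
          omega
        rw [hfil]
        rw [PySem.List.slice_toNat xs (by omega) (by omega)]
        have h0 : (max 0 (min W b)).toNat - (max 0 a).toNat = 0 := by omega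
        simp [h0]

lemma pvSliceEq {α : Type} (xs : List α) (d : α) (W a b : Int) (hW : 0 ≤ W)
    (h : min W b ≤ (xs.length : Int) ∨ min W b ≤ max 0 a) :
    ((PySem.List.pyRange a b 1).filter (fun c => decide (0 ≤ c ∧ c < W))).map
        (fun c => PySem.List.pyGetD xs c d)
      = PySem.List.slice xs (some (max 0 a)) (some (max 0 (min W b))) := by
  rcases h with h | h
  · exact pvSliceEq_len xs d W b hW h (b - a).toNat a rfl
  · have hfil : (PySem.List.pyRange a b 1).filter (fun c => decide (0 ≤ c ∧ c < W)) = [] := by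
      rw [List.filter_eq_nil_iff]
      intro c hcmem
      have hm := PySem.List.mem_pyRange_one.mp hcmem
      simp only [decide_eq_true_eq]
      omega
    rw [hfil]
    rw [PySem.List.slice_toNat xs (by omega) (by omega)]
    have h0 : (max 0 (min W b)).toNat - (max 0 a).toNat = 0 := by omega
    simp [h0]

-- B's loop as a flatMap over the clipped row range.
lemma pvB_flat (frame : List (List String)) (row col radius : Int) :
    get_spatial_context_alt frame row col radius
      = (PySem.List.pyRange (max 0 (row - radius)) (min (frame.length : Int) (row + radius + 1)) 1).flatMap
          (pvRowB frame row col radius) := by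
  unfold get_spatial_context_alt
  rw [PySem.List.foldl_congr_mem _ _
      (fun context r => context ++ pvRowB frame row col radius r) _ ?_]
  · rw [PySem.List.foldl_append_eq_flatMap]
    simp
  · intro acc r _
    by_cases h : r = row
    · simp [pvRowB, h]
    · simp [pvRowB, h]

-- A's nested loops as a flatMap of per-row contributions over the unclipped row range.
lemma pvA_flat (frame : List (List String)) (row col radius : Int) :
    get_spatial_context frame row col radius
      = (PySem.List.pyRange (row - radius) (row + radius + 1) 1).flatMap
          (pvRowA frame row col radius) := by
  unfold get_spatial_context
  rw [PySem.List.foldl_congr_mem _ _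
      (fun context dr => context ++ pvRowA frame row col radius (row + dr)) _ ?_]
  · rw [PySem.List.foldl_append_eq_flatMap]
    rw [pvRange_shift_flatMap row (-radius) (radius + 1) (pvRowA frame row col radius)]
    have e1 : row + -radius = row - radius := by ring
    have e2 : row + (radius + 1) = row + radius + 1 := by ring
    rw [e1, e2]
    simp
  · intro acc dr _
    rw [PySem.List.foldl_congr_mem _ _
        (fun context dc => if decide (¬(row + dr = row ∧ col + dc = col) ∧
            (0 ≤ row + dr ∧ row + dr < (frame.length : Int) ∧ 0 ≤ col + dc ∧
             col + dc < ((frame.headD []).length : Int))) = true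
          then context ++ [PySem.List.pyGetD (PySem.List.pyGetD frame (row + dr) []) (col + dc) ""]
          else context) _ ?_]
    · rw [PySem.List.foldl_append_if]
      unfold pvRowA
      congr 1
      have := pvRange_shift_filter_map col (-radius) (radius + 1)
        (fun c => decide (¬(row + dr = row ∧ c = col) ∧
            (0 ≤ row + dr ∧ row + dr < (frame.length : Int) ∧ 0 ≤ c ∧
             c < ((frame.headD []).length : Int))))
        (fun c => PySem.List.pyGetD (PySem.List.pyGetD frame (row + dr) []) c "")
      have e1 : col + -radius = col - radius := by ring
      have e2 : col + (radius + 1) = col + radius + 1 := by ring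
      rw [e1, e2] at this
      exact this
    · intro acc2 dc _
      by_cases h1 : dr = 0 ∧ dc = 0
      · simp [h1]
      · by_cases h2 : 0 ≤ row + dr ∧ row + dr < (frame.length : Int) ∧ 0 ≤ col + dc ∧
            col + dc < ((frame.headD []).length : Int)
        · simp [h1, h2]
        · simp [h1]

-- Per-row agreement for rows inside the clipped range, under Pre_ instantiated at that row.
lemma pvRow_eq (frame : List (List String)) (row col radius r : Int)
    (h0r : 0 ≤ r) (hrH : r < (frame.length : Int))
    (hlo : row - radius ≤ r) (_hhi : r < row + radius + 1)
    (hP : min ((frame.headD []).length : Int) (col + radius + 1) ≤ ((frame.getD r.toNat []).length : Int)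
       ∨ min ((frame.headD []).length : Int) (col + radius + 1) ≤ max 0 (col - radius)
       ∨ ((r.toNat : Int) = row ∧ col + 1 = min ((frame.headD []).length : Int) (col + radius + 1)
          ∧ (min ((frame.headD []).length : Int) (col + radius + 1) - 1 ≤ ((frame.getD r.toNat []).length : Int)
             ∨ min ((frame.headD []).length : Int) (col + radius + 1) - 1 ≤ max 0 (col - radius)))) :
    pvRowA frame row col radius r = pvRowB frame row col radius r := by
  have hrnat : (r.toNat : Int) = r := by omega
  have hrlen : r.toNat < frame.length := by omega
  have hxs : PySem.List.pyGetD frame r [] = frame.getD r.toNat [] := by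
    rw [PySem.List.pyGetD_eq_getElem frame [] h0r hrH, List.getD_eq_getElem frame [] hrlen]
  have hW : (0 : Int) ≤ ((frame.headD []).length : Int) := by positivity
  have hL : ((PySem.List.pyGetD frame r []).length : Int) = ((frame.getD r.toNat []).length : Int) := by
    rw [hxs]
  by_cases hrr : r = row
  · -- center row
    have hrad : 0 ≤ radius := by omega
    unfold pvRowA
    simp only [pvRowB]
    rw [if_neg (show ¬ r ≠ row by simpa using hrr)]
    have hp : (fun c => decide (¬(r = row ∧ c = col) ∧
        (0 ≤ r ∧ r < (frame.length : Int) ∧ 0 ≤ c ∧ c < ((frame.headD []).length : Int))))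
        = (fun c => decide (¬(c = col) ∧ (0 ≤ c ∧ c < ((frame.headD []).length : Int)))) := by
      funext c
      rw [decide_eq_decide]
      constructor
      · rintro ⟨h1, _, _, h4, h5⟩
        exact ⟨fun hc => h1 ⟨hrr, hc⟩, h4, h5⟩
      · rintro ⟨h1, h4, h5⟩
        exact ⟨fun hc => h1 hc.2, h0r, hrH, h4, h5⟩
    rw [hp]
    rw [PySem.List.pyRange_one_append (col - radius) col (col + radius + 1) (by omega) (by omega)]
    rw [PySem.List.pyRange_one_append col (col + 1) (col + radius + 1) (by omega) (by omega)]
    rw [List.filter_append, List.filter_append, List.map_append, List.map_append]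
    have hmid : (PySem.List.pyRange col (col + 1) 1).filter
        (fun c => decide (¬(c = col) ∧ (0 ≤ c ∧ c < ((frame.headD []).length : Int)))) = [] := by
      rw [PySem.List.pyRange_one_singleton]
      simp
    rw [hmid, List.map_nil]
    have hp1 : ((PySem.List.pyRange (col - radius) col 1).filter
        (fun c => decide (¬(c = col) ∧ (0 ≤ c ∧ c < ((frame.headD []).length : Int)))))
        = ((PySem.List.pyRange (col - radius) col 1).filter
        (fun c => decide (0 ≤ c ∧ c < ((frame.headD []).length : Int)))) := by
      apply List.filter_congr
      intro c hc
      have hm := PySem.List.mem_pyRange_one.mp hc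
      rw [decide_eq_decide]
      constructor
      · exact fun h => h.2
      · exact fun h => ⟨by omega, h⟩
    have hp3 : ((PySem.List.pyRange (col + 1) (col + radius + 1) 1).filter
        (fun c => decide (¬(c = col) ∧ (0 ≤ c ∧ c < ((frame.headD []).length : Int)))))
        = ((PySem.List.pyRange (col + 1) (col + radius + 1) 1).filter
        (fun c => decide (0 ≤ c ∧ c < ((frame.headD []).length : Int)))) := by
      apply List.filter_congr
      intro c hc
      have hm := PySem.List.mem_pyRange_one.mp hc
      rw [decide_eq_decide]
      constructor
      · exact fun h => h.2
      · exact fun h => ⟨by omega, h⟩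
    rw [hp1, hp3]
    rw [pvSliceEq (PySem.List.pyGetD frame r []) "" ((frame.headD []).length : Int)
        (col - radius) col hW (by omega)]
    rw [pvSliceEq (PySem.List.pyGetD frame r []) "" ((frame.headD []).length : Int)
        (col + 1) (col + radius + 1) hW (by omega)]
    have e1 : max 0 (min ((frame.headD []).length : Int) col)
        = min (max 0 (min ((frame.headD []).length : Int) (col + radius + 1))) (max 0 col) := by
      omega
    have e2 : (max 0 (col + 1)) = max (max 0 (col - radius)) (col + 1) := by omega
    rw [e1, e2, List.nil_append]
  · -- other rows
    unfold pvRowA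
    simp only [pvRowB]
    rw [if_pos hrr]
    have hp : (fun c => decide (¬(r = row ∧ c = col) ∧
        (0 ≤ r ∧ r < (frame.length : Int) ∧ 0 ≤ c ∧ c < ((frame.headD []).length : Int))))
        = (fun c => decide (0 ≤ c ∧ c < ((frame.headD []).length : Int))) := by
      funext c
      rw [decide_eq_decide]
      constructor
      · rintro ⟨_, _, _, h4, h5⟩
        exact ⟨h4, h5⟩
      · rintro ⟨h4, h5⟩
        exact ⟨fun hc => hrr hc.1, h0r, hrH, h4, h5⟩
    rw [hp]
    rw [pvSliceEq (PySem.List.pyGetD frame r []) "" ((frame.headD []).length : Int)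
        (col - radius) (col + radius + 1) hW (by omega)]

theorem pvMain_eq (frame : List (List String)) (row col radius : Int)
    (hpre : Pre_get_spatial_context frame row col radius) :
    get_spatial_context frame row col radius = get_spatial_context_alt frame row col radius := by
  rw [pvA_flat, pvB_flat]
  by_cases hcase : min (frame.length : Int) (row + radius + 1) ≤ max 0 (row - radius)
  · rw [PySem.List.pyRange_one_eq_nil hcase]
    simp only [List.flatMap_nil]
    rw [List.flatMap_eq_nil_iff.mpr]
    intro r hr
    have hm := PySem.List.mem_pyRange_one.mp hr
    unfold pvRowA
    rw [List.filter_eq_nil_iff.mpr, List.map_nil]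
    intro c hc
    simp only [decide_eq_true_eq]
    omega
  · rw [not_le] at hcase
    rw [PySem.List.pyRange_one_append (row - radius) (max 0 (row - radius)) (row + radius + 1)
        (by omega) (by omega)]
    rw [PySem.List.pyRange_one_append (max 0 (row - radius))
        (min (frame.length : Int) (row + radius + 1)) (row + radius + 1) (by omega) (by omega)]
    rw [List.flatMap_append, List.flatMap_append]
    have hnil1 : (PySem.List.pyRange (row - radius) (max 0 (row - radius)) 1).flatMap
        (pvRowA frame row col radius) = [] := by
      rw [List.flatMap_eq_nil_iff]
      intro r hr
      have hm := PySem.List.mem_pyRange_one.mp hr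
      unfold pvRowA
      rw [List.filter_eq_nil_iff.mpr, List.map_nil]
      intro c hc
      simp only [decide_eq_true_eq]
      omega
    have hnil3 : (PySem.List.pyRange (min (frame.length : Int) (row + radius + 1))
        (row + radius + 1) 1).flatMap (pvRowA frame row col radius) = [] := by
      rw [List.flatMap_eq_nil_iff]
      intro r hr
      have hm := PySem.List.mem_pyRange_one.mp hr
      unfold pvRowA
      rw [List.filter_eq_nil_iff.mpr, List.map_nil]
      intro c hc
      simp only [decide_eq_true_eq]
      omega
    rw [hnil1, hnil3, List.nil_append, List.append_nil]
    apply pvFlatMap_congr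
    intro r hr
    have hm := PySem.List.mem_pyRange_one.mp hr
    have h0r : 0 ≤ r := by omega
    have hrH : r < (frame.length : Int) := by omega
    exact pvRow_eq frame row col radius r h0r hrH (by omega) (by omega)
      (hpre r.toNat (by omega) (by omega) (by omega))

-- ===== VERDICT (by name: the statement is the Claim_ definition above) =====
theorem get_spatial_context_spec : Claim_equal_get_spatial_context := by
  intro frame row col radius _hdom hpre
  unfold Spec_get_spatial_context
  exact pvMain_eq frame row col radius hpre
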